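-- pv_equiv track=rewrite | github.com/EdouardoGhoussein/CPU-FPGA | compiler.py | inst_check_size
-- ===== SOURCE A (Python) =====
-- instruction_categories = {
--     "r_type": [
--         "ADD",
--         "SUB",
--         "MUL",
--         "AND",
--         "OR",
--         "XOR",
--         "NOT",
--         "LSL",
--         "LSR",
--     ],
--     "r_type_move": ["MOV", "CMP"],
--     "memory_access": ["LD", "ST"],
--     "stack": ["PUSH", "POP"],
--     "branching": ["B", "BEQ", "BNE", "BLT", "BGT", "BLE", "BGE"],
--     "branch_link": ["BL", "BLEQ", "BLNE", "BLLT", "BLGT", "BLLE", "BLGE"],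
--     "branch_return": ["BX", "BXEQ", "BXNE", "BXLT", "BXGT", "BXLE", "BXGE"],
--     "special": ["NOP"],
--     "mmx_vector": [
--         "VADD",
--         "VSUB",
--         "VMUL",
--         "VAND",
--         "VOR",
--         "VXOR",
--         "VNOT",
--         "VLSL",
--         "VLSR",
--         "VDOT",
--     ],
--     "mmx_matrix": [
--         "MADD",
--         "MSUB",
--         "MMUL",
--         "MAND",
--         "MOR",
--         "MXOR",
--         "MNOT",
--         "MLSL",
--         "MLSR",
--         "MATMUL",
--     ],
--     "mmx_move": ["VMOV"],
-- }
--
-- expected_parts = {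
--     "r_type": 4,
--     "r_type_move": 3,
--     "memory_access": 3,
--     "stack": {"PUSH": 2, "POP": 3},
--     "branching": 2,
--     "branch_link": 2,
--     "branch_return": 1,
--     "special": 1,
--     "mmx_vector": 4,
--     "mmx_matrix": 4,
--     "mmx_move": 3,
-- }
--
-- def inst_check_size(inst_parts):
--     """Check if the instruction has the correct number of parts."""
--     mnemonic = inst_parts[0]
--
--     # Determine the category of the instruction
--     for category, mnemonics in instruction_categories.items():
--         if mnemonic in mnemonics:
--             # Handle stack instructions separately
--             if category == "stack":
--                 expected = expected_parts[category][mnemonic]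
--             else:
--                 expected = expected_parts[category]
--
--             # Check if the number of parts matches
--             if len(inst_parts) != expected:
--                 return False
--             return True
--
--     # If the mnemonic is not found in any category
--     return False
-- ===== SOURCE B (Python) =====
-- _EXPECTED_SIZE = {
--     "ADD": 4,
--     "SUB": 4,
--     "MUL": 4,
--     "AND": 4,
--     "OR": 4,
--     "XOR": 4,
--     "NOT": 4,
--     "LSL": 4,
--     "LSR": 4,
--     "MOV": 3,
--     "CMP": 3,
--     "LD": 3,
--     "ST": 3,
--     "PUSH": 2,
--     "POP": 3,
--     "B": 2,
--     "BEQ": 2,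
--     "BNE": 2,
--     "BLT": 2,
--     "BGT": 2,
--     "BLE": 2,
--     "BGE": 2,
--     "BL": 2,
--     "BLEQ": 2,
--     "BLNE": 2,
--     "BLLT": 2,
--     "BLGT": 2,
--     "BLLE": 2,
--     "BLGE": 2,
--     "BX": 1,
--     "BXEQ": 1,
--     "BXNE": 1,
--     "BXLT": 1,
--     "BXGT": 1,
--     "BXLE": 1,
--     "BXGE": 1,
--     "NOP": 1,
--     "VADD": 4,
--     "VSUB": 4,
--     "VMUL": 4,
--     "VAND": 4,
--     "VOR": 4,
--     "VXOR": 4,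
--     "VNOT": 4,
--     "VLSL": 4,
--     "VLSR": 4,
--     "VDOT": 4,
--     "MADD": 4,
--     "MSUB": 4,
--     "MMUL": 4,
--     "MAND": 4,
--     "MOR": 4,
--     "MXOR": 4,
--     "MNOT": 4,
--     "MLSL": 4,
--     "MLSR": 4,
--     "MATMUL": 4,
--     "VMOV": 3,
-- }
--
--
-- def inst_check_size(inst_parts):
--     """Check if the instruction has the correct number of parts."""
--     expected = _EXPECTED_SIZE.get(inst_parts[0])
--     if expected is None:
--         return False
--     return len(inst_parts) == expected
-- ===== Notes on version B (the rewrite author's own statement) =====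
-- stated objective: simpler
-- what changed: Replaces the loop over the category table plus the stack special-case branch with a single flat mnemonic->expected-size dict built once and one .get lookup.
-- outside the precondition, e.g. on inst_check_size([]): A raises IndexError, B raises IndexError
import Mathlib
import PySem

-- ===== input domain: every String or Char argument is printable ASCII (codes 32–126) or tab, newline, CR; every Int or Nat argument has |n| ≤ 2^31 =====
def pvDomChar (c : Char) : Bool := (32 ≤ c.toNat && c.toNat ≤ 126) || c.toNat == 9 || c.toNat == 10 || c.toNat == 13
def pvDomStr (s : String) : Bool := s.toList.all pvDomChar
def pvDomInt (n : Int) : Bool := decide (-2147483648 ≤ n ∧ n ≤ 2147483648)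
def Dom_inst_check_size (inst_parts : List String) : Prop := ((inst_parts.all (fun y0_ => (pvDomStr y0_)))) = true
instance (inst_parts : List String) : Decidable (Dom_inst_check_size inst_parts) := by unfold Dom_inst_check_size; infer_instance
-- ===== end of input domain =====

-- ===== PORT A =====
-- Transliteration of A: scan the category table, resolve 'expected' (stack via inner dict), compare length.
def pvCategories : List (String × List String) := [("r_type", ["ADD", "SUB", "MUL", "AND", "OR", "XOR", "NOT", "LSL", "LSR"]), ("r_type_move", ["MOV", "CMP"]), ("memory_access", ["LD", "ST"]), ("stack", ["PUSH", "POP"]), ("branching", ["B", "BEQ", "BNE", "BLT", "BGT", "BLE", "BGE"]), ("branch_link", ["BL", "BLEQ", "BLNE", "BLLT", "BLGT", "BLLE", "BLGE"]), ("branch_return", ["BX", "BXEQ", "BXNE", "BXLT", "BXGT", "BXLE", "BXGE"]), ("special", ["NOP"]), ("mmx_vector", ["VADD", "VSUB", "VMUL", "VAND", "VOR", "VXOR", "VNOT", "VLSL", "VLSR", "VDOT"]), ("mmx_matrix", ["MADD", "MSUB", "MMUL", "MAND", "MOR", "MXOR", "MNOT", "MLSL", "MLSR", "MATMUL"]), ("mmx_move",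 ["VMOV"])]
def pvExpectedParts : PySem.Dict String Int := PySem.Dict.mk [("r_type", 4), ("r_type_move", 3), ("memory_access", 3), ("branching", 2), ("branch_link", 2), ("branch_return", 1), ("special", 1), ("mmx_vector", 4), ("mmx_matrix", 4), ("mmx_move", 3)]
def pvStackExpected : PySem.Dict String Int := PySem.Dict.mk [("PUSH", 2), ("POP", 3)]

-- the for-loop over instruction_categories.items() (early return inside)
def pvLoopA (mnemonic : String) (len : Int) : List (String × List String) → Bool
  | [] => false
  | (category, mnemonics) :: rest =>
    if mnemonics.contains mnemonic then
      let expected : Int :=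
        if category == "stack" then (pvStackExpected.get? mnemonic).getD 0
        else (pvExpectedParts.get? category).getD 0
      if len ≠ expected then false else true
    else pvLoopA mnemonic len rest

def inst_check_size (inst_parts : List String) : Bool :=
  match inst_parts.head? with
  | none => false      -- Python raises IndexError here; excluded by Pre_
  | some mnemonic => pvLoopA mnemonic (inst_parts.length : Int) pvCategories

-- ===== PORT B =====
-- B: one flat mnemonic -> expected-size dict, a single .get lookup.
def pvFlatTable : PySem.Dict String Int := PySem.Dict.mk [("ADD", 4), ("SUB", 4), ("MUL", 4), ("AND", 4), ("OR", 4), ("XOR", 4), ("NOT", 4), ("LSL", 4), ("LSR", 4), ("MOV", 3), ("CMP", 3), ("LD", 3), ("ST", 3), ("PUSH", 2), ("POP", 3), ("B", 2), ("BEQ", 2), ("BNE", 2), ("BLT", 2), ("BGT", 2), ("BLE", 2), ("BGE", 2), ("BL", 2), ("BLEQ", 2), ("BLNE", 2), ("BLLT", 2), ("BLGT", 2), ("BLLE", 2), ("BLGE", 2), ("BX", 1), ("BXEQ", 1), ("BXNE", 1), ("BXLT", 1), ("BXGT", 1), ("BXLE", 1), ("BXGE", 1), ("NOP", 1), ("VADD",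 4), ("VSUB", 4), ("VMUL", 4), ("VAND", 4), ("VOR", 4), ("VXOR", 4), ("VNOT", 4), ("VLSL", 4), ("VLSR", 4), ("VDOT", 4), ("MADD", 4), ("MSUB", 4), ("MMUL", 4), ("MAND", 4), ("MOR", 4), ("MXOR", 4), ("MNOT", 4), ("MLSL", 4), ("MLSR", 4), ("MATMUL", 4), ("VMOV", 3)]
def inst_check_size_alt (inst_parts : List String) : Bool :=
  match inst_parts.head? with
  | none => false      -- Python raises IndexError here; excluded by Pre_
  | some mnemonic =>
    match pvFlatTable.get? mnemonic with
    | none => false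
    | some expected => decide ((inst_parts.length : Int) = expected)

-- ===== PRECONDITION & SPEC =====
-- Pre_ excludes only the empty list, on which Python A (and B) raise IndexError.
def Pre_inst_check_size (inst_parts : List String) : Prop := inst_parts ≠ []
instance (inst_parts : List String) : Decidable (Pre_inst_check_size inst_parts) := by unfold Pre_inst_check_size; infer_instance
def pvWitness_inst_check_size : List String := ["ADD", "R1", "R2", "R3"]
def Spec_inst_check_size (inst_parts : List String) (out : Bool) : Prop := out = inst_check_size_alt inst_parts
instance (inst_parts : List String) (out : Bool) : Decidable (Spec_inst_check_size inst_parts out) := by unfold Spec_inst_check_size; infer_instance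

-- ===== CLAIM (what is proved, stated in full; the proofs are below) =====
def Claim_equal_inst_check_size : Prop := ∀ (inst_parts : List String), Dom_inst_check_size inst_parts → Pre_inst_check_size inst_parts → Spec_inst_check_size inst_parts (inst_check_size inst_parts)

-- ===== LEMMAS AND PROOFS =====
-- Core: for every mnemonic, A's category scan agrees with B's flat lookup.
theorem pvLoop_eq_flat (m : String) (len : Int) :
    pvLoopA m len pvCategories =
      (match pvFlatTable.get? m with
       | none => false
       | some expected => decide (len = expected)) := by
  by_cases h0 : m = "ADD"
  · subst h0; simp [pvLoopA, pvCategories, pvFlatTable, pvExpectedParts, PySem.Dict.get?_mk_cons]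
  by_cases h1 : m = "SUB"
  · subst h1; simp [pvLoopA, pvCategories, pvFlatTable, pvExpectedParts, PySem.Dict.get?_mk_cons]
  by_cases h2 : m = "MUL"
  · subst h2; simp [pvLoopA, pvCategories, pvFlatTable, pvExpectedParts, PySem.Dict.get?_mk_cons]
  by_cases h3 : m = "AND"
  · subst h3; simp [pvLoopA, pvCategories, pvFlatTable, pvExpectedParts, PySem.Dict.get?_mk_cons]
  by_cases h4 : m = "OR"
  · subst h4; simp [pvLoopA, pvCategories, pvFlatTable, pvExpectedParts, PySem.Dict.get?_mk_cons]
  by_cases h5 : m = "XOR"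
  · subst h5; simp [pvLoopA, pvCategories, pvFlatTable, pvExpectedParts, PySem.Dict.get?_mk_cons]
  by_cases h6 : m = "NOT"
  · subst h6; simp [pvLoopA, pvCategories, pvFlatTable, pvExpectedParts, PySem.Dict.get?_mk_cons]
  by_cases h7 : m = "LSL"
  · subst h7; simp [pvLoopA, pvCategories, pvFlatTable, pvExpectedParts, PySem.Dict.get?_mk_cons]
  by_cases h8 : m = "LSR"
  · subst h8; simp [pvLoopA, pvCategories, pvFlatTable, pvExpectedParts, PySem.Dict.get?_mk_cons]
  by_cases h9 : m = "MOV"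
  · subst h9; simp [pvLoopA, pvCategories, pvFlatTable, pvExpectedParts, PySem.Dict.get?_mk_cons]
  by_cases h10 : m = "CMP"
  · subst h10; simp [pvLoopA, pvCategories, pvFlatTable, pvExpectedParts, PySem.Dict.get?_mk_cons]
  by_cases h11 : m = "LD"
  · subst h11; simp [pvLoopA, pvCategories, pvFlatTable, pvExpectedParts, PySem.Dict.get?_mk_cons]
  by_cases h12 : m = "ST"
  · subst h12; simp [pvLoopA, pvCategories, pvFlatTable, pvExpectedParts, PySem.Dict.get?_mk_cons]
  by_cases h13 : m = "PUSH"
  · subst h13; simp [pvLoopA, pvCategories, pvFlatTable, pvStackExpected, PySem.Dict.get?_mk_cons]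
  by_cases h14 : m = "POP"
  · subst h14; simp [pvLoopA, pvCategories, pvFlatTable, pvStackExpected, PySem.Dict.get?_mk_cons]
  by_cases h15 : m = "B"
  · subst h15; simp [pvLoopA, pvCategories, pvFlatTable, pvExpectedParts, PySem.Dict.get?_mk_cons]
  by_cases h16 : m = "BEQ"
  · subst h16; simp [pvLoopA, pvCategories, pvFlatTable, pvExpectedParts, PySem.Dict.get?_mk_cons]
  by_cases h17 : m = "BNE"
  · subst h17; simp [pvLoopA, pvCategories, pvFlatTable, pvExpectedParts, PySem.Dict.get?_mk_cons]
  by_cases h18 : m = "BLT"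
  · subst h18; simp [pvLoopA, pvCategories, pvFlatTable, pvExpectedParts, PySem.Dict.get?_mk_cons]
  by_cases h19 : m = "BGT"
  · subst h19; simp [pvLoopA, pvCategories, pvFlatTable, pvExpectedParts, PySem.Dict.get?_mk_cons]
  by_cases h20 : m = "BLE"
  · subst h20; simp [pvLoopA, pvCategories, pvFlatTable, pvExpectedParts, PySem.Dict.get?_mk_cons]
  by_cases h21 : m = "BGE"
  · subst h21; simp [pvLoopA, pvCategories, pvFlatTable, pvExpectedParts, PySem.Dict.get?_mk_cons]
  by_cases h22 : m = "BL"
  · subst h22; simp [pvLoopA, pvCategories, pvFlatTable, pvExpectedParts, PySem.Dict.get?_mk_cons]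
  by_cases h23 : m = "BLEQ"
  · subst h23; simp [pvLoopA, pvCategories, pvFlatTable, pvExpectedParts, PySem.Dict.get?_mk_cons]
  by_cases h24 : m = "BLNE"
  · subst h24; simp [pvLoopA, pvCategories, pvFlatTable, pvExpectedParts, PySem.Dict.get?_mk_cons]
  by_cases h25 : m = "BLLT"
  · subst h25; simp [pvLoopA, pvCategories, pvFlatTable, pvExpectedParts, PySem.Dict.get?_mk_cons]
  by_cases h26 : m = "BLGT"
  · subst h26; simp [pvLoopA, pvCategories, pvFlatTable, pvExpectedParts, PySem.Dict.get?_mk_cons]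
  by_cases h27 : m = "BLLE"
  · subst h27; simp [pvLoopA, pvCategories, pvFlatTable, pvExpectedParts, PySem.Dict.get?_mk_cons]
  by_cases h28 : m = "BLGE"
  · subst h28; simp [pvLoopA, pvCategories, pvFlatTable, pvExpectedParts, PySem.Dict.get?_mk_cons]
  by_cases h29 : m = "BX"
  · subst h29; simp [pvLoopA, pvCategories, pvFlatTable, pvExpectedParts, PySem.Dict.get?_mk_cons]
  by_cases h30 : m = "BXEQ"
  · subst h30; simp [pvLoopA, pvCategories, pvFlatTable, pvExpectedParts, PySem.Dict.get?_mk_cons]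
  by_cases h31 : m = "BXNE"
  · subst h31; simp [pvLoopA, pvCategories, pvFlatTable, pvExpectedParts, PySem.Dict.get?_mk_cons]
  by_cases h32 : m = "BXLT"
  · subst h32; simp [pvLoopA, pvCategories, pvFlatTable, pvExpectedParts, PySem.Dict.get?_mk_cons]
  by_cases h33 : m = "BXGT"
  · subst h33; simp [pvLoopA, pvCategories, pvFlatTable, pvExpectedParts, PySem.Dict.get?_mk_cons]
  by_cases h34 : m = "BXLE"
  · subst h34; simp [pvLoopA, pvCategories, pvFlatTable, pvExpectedParts, PySem.Dict.get?_mk_cons]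
  by_cases h35 : m = "BXGE"
  · subst h35; simp [pvLoopA, pvCategories, pvFlatTable, pvExpectedParts, PySem.Dict.get?_mk_cons]
  by_cases h36 : m = "NOP"
  · subst h36; simp [pvLoopA, pvCategories, pvFlatTable, pvExpectedParts, PySem.Dict.get?_mk_cons]
  by_cases h37 : m = "VADD"
  · subst h37; simp [pvLoopA, pvCategories, pvFlatTable, pvExpectedParts, PySem.Dict.get?_mk_cons]
  by_cases h38 : m = "VSUB"
  · subst h38; simp [pvLoopA, pvCategories, pvFlatTable, pvExpectedParts, PySem.Dict.get?_mk_cons]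
  by_cases h39 : m = "VMUL"
  · subst h39; simp [pvLoopA, pvCategories, pvFlatTable, pvExpectedParts, PySem.Dict.get?_mk_cons]
  by_cases h40 : m = "VAND"
  · subst h40; simp [pvLoopA, pvCategories, pvFlatTable, pvExpectedParts, PySem.Dict.get?_mk_cons]
  by_cases h41 : m = "VOR"
  · subst h41; simp [pvLoopA, pvCategories, pvFlatTable, pvExpectedParts, PySem.Dict.get?_mk_cons]
  by_cases h42 : m = "VXOR"
  · subst h42; simp [pvLoopA, pvCategories, pvFlatTable, pvExpectedParts, PySem.Dict.get?_mk_cons]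
  by_cases h43 : m = "VNOT"
  · subst h43; simp [pvLoopA, pvCategories, pvFlatTable, pvExpectedParts, PySem.Dict.get?_mk_cons]
  by_cases h44 : m = "VLSL"
  · subst h44; simp [pvLoopA, pvCategories, pvFlatTable, pvExpectedParts, PySem.Dict.get?_mk_cons]
  by_cases h45 : m = "VLSR"
  · subst h45; simp [pvLoopA, pvCategories, pvFlatTable, pvExpectedParts, PySem.Dict.get?_mk_cons]
  by_cases h46 : m = "VDOT"
  · subst h46; simp [pvLoopA, pvCategories, pvFlatTable, pvExpectedParts, PySem.Dict.get?_mk_cons]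
  by_cases h47 : m = "MADD"
  · subst h47; simp [pvLoopA, pvCategories, pvFlatTable, pvExpectedParts, PySem.Dict.get?_mk_cons]
  by_cases h48 : m = "MSUB"
  · subst h48; simp [pvLoopA, pvCategories, pvFlatTable, pvExpectedParts, PySem.Dict.get?_mk_cons]
  by_cases h49 : m = "MMUL"
  · subst h49; simp [pvLoopA, pvCategories, pvFlatTable, pvExpectedParts, PySem.Dict.get?_mk_cons]
  by_cases h50 : m = "MAND"
  · subst h50; simp [pvLoopA, pvCategories, pvFlatTable, pvExpectedParts, PySem.Dict.get?_mk_cons]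
  by_cases h51 : m = "MOR"
  · subst h51; simp [pvLoopA, pvCategories, pvFlatTable, pvExpectedParts, PySem.Dict.get?_mk_cons]
  by_cases h52 : m = "MXOR"
  · subst h52; simp [pvLoopA, pvCategories, pvFlatTable, pvExpectedParts, PySem.Dict.get?_mk_cons]
  by_cases h53 : m = "MNOT"
  · subst h53; simp [pvLoopA, pvCategories, pvFlatTable, pvExpectedParts, PySem.Dict.get?_mk_cons]
  by_cases h54 : m = "MLSL"
  · subst h54; simp [pvLoopA, pvCategories, pvFlatTable, pvExpectedParts, PySem.Dict.get?_mk_cons]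
  by_cases h55 : m = "MLSR"
  · subst h55; simp [pvLoopA, pvCategories, pvFlatTable, pvExpectedParts, PySem.Dict.get?_mk_cons]
  by_cases h56 : m = "MATMUL"
  · subst h56; simp [pvLoopA, pvCategories, pvFlatTable, pvExpectedParts, PySem.Dict.get?_mk_cons]
  by_cases h57 : m = "VMOV"
  · subst h57; simp [pvLoopA, pvCategories, pvFlatTable, pvExpectedParts, PySem.Dict.get?_mk_cons]
  simp only [pvLoopA, pvCategories, pvFlatTable, List.contains_cons, List.contains_nil,
    PySem.Dict.get?, beq_iff_eq]
  simp [h0, Ne.symm h0, h1, Ne.symm h1, h2, Ne.symm h2, h3, Ne.symm h3, h4, Ne.symm h4, h5, Ne.symm h5, h6, Ne.symm h6, h7, Ne.symm h7, h8, Ne.symm h8, h9, Ne.symm h9, h10, Ne.symm h10, h11, Ne.symm h11, h12, Ne.symm h12, h13, Ne.symm h13, h14, Ne.symm h14, h15, Ne.symm h15, h16, Ne.symm h16, h17, Ne.symm h17, h18, Ne.symm h18, h19, Ne.symm h19, h20, Ne.symm h20, h21, Ne.symm h21, h22, Ne.symm h22, h23, Ne.symm h23, h24, Ne.symm h24, h25,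 Ne.symm h25, h26, Ne.symm h26, h27, Ne.symm h27, h28, Ne.symm h28, h29, Ne.symm h29, h30, Ne.symm h30, h31, Ne.symm h31, h32, Ne.symm h32, h33, Ne.symm h33, h34, Ne.symm h34, h35, Ne.symm h35, h36, Ne.symm h36, h37, Ne.symm h37, h38, Ne.symm h38, h39, Ne.symm h39, h40, Ne.symm h40, h41, Ne.symm h41, h42, Ne.symm h42, h43, Ne.symm h43, h44, Ne.symm h44, h45, Ne.symm h45, h46, Ne.symm h46, h47, Ne.symm h47, h48, Ne.symm h48, h49, Ne.symm h49, h50, Ne.symm h50, h51, Ne.symm h51, h52, Ne.symm h52, h53, Ne.symm h53, h54, Ne.symm h54, h55, Ne.symm h55, h56, Ne.symm h56, h57, Ne.symm h57]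

-- ===== VERDICT (by name: the statement is the Claim_ definition above) =====
theorem inst_check_size_spec : Claim_equal_inst_check_size := by
  intro inst_parts _ _
  unfold Spec_inst_check_size inst_check_size inst_check_size_alt
  cases inst_parts with
  | nil => rfl
  | cons m rest => simpa using pvLoop_eq_flat m ((m :: rest).length : Int)
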